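-- pv_equiv track=rewrite | github.com/Guillermo-maker/AED_UTN_2024 | A.E.D/segundo_parcial/T2_413391_Andino.py | cantida_de_palabra
-- ===== SOURCE A (Python) =====
-- def cantida_de_palabra(archivo_leido):
--     palabras = archivo_leido.split()
--     r4 = 0
--     for palabra in palabras:
--         palabra = palabra.lower()  # Convertir la palabra a minúsculas para hacer la búsqueda insensible a mayúsculas
--         if 'de' in palabra and 't' in palabra[palabra.index('de') + 2:]:
--             r4 += 1
--     return r4
-- ===== SOURCE B (Python) =====
-- def _tiene_de_t(palabra):
--     # one left-to-right pass: tiny automaton matching 'de' (first occurrence) then a later 't'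
--     estado = 0  # 0: nothing, 1: just saw 'd', 2: past the first 'de'
--     for ch in palabra:
--         if estado == 0:
--             estado = 1 if ch == 'd' else 0
--         elif estado == 1:
--             estado = 2 if ch == 'e' else (1 if ch == 'd' else 0)
--         else:
--             if ch == 't':
--                 return True
--     return False
--
-- def cantida_de_palabra(archivo_leido):
--     return sum(1 for w in archivo_leido.split() if _tiene_de_t(w.lower()))
-- ===== Notes on version B (the rewrite author's own statement) =====
-- stated objective: alternative
-- what changed: Per word, A runs three substring operations (membership test for de, then index, then a slice searched for a trailing t); B instead makes a single left-to-right pass over each lowered word with a 3-state automaton (nothing seen / d just seen / past the first d-e pair, now scanning for t) and sums the matching words.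
import Mathlib
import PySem

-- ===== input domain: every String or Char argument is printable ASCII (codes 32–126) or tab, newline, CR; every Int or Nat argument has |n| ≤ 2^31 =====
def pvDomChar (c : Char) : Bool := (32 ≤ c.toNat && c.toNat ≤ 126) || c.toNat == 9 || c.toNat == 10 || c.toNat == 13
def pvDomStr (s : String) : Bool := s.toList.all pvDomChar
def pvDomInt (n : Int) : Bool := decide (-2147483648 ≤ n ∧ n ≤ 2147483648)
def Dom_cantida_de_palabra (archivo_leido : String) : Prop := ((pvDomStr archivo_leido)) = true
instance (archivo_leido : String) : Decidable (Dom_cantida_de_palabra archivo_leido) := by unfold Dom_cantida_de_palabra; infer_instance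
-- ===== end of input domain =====

-- B replaces the per-word 'de' in w / w.index('de') / slice / 't' in slice logic by a single
-- left-to-right automaton pass per word (objective: alternative; same asymptotic cost).

-- ===== PORT A =====
-- 'palabra.index("de")' is reached only under the guard '"de" in palabra', where str.index = str.find;
-- it is ported as PySem.Str.find (exact on that branch).
def cantida_de_palabra (archivo_leido : String) : Int :=
  let palabras := PySem.Str.split₀ archivo_leido
  palabras.foldl (fun r4 palabra =>
    let p := PySem.Str.lower palabra
    if PySem.Str.isIn "de" p &&
       PySem.Str.isIn "t" (PySem.Str.slice p (some (PySem.Str.find p "de" + 2)) none)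
    then r4 + 1 else r4) 0

-- ===== PORT B =====
-- the automaton of Source B's _tiene_de_t: state 0 = nothing, 1 = just saw 'd', 2 = past the first 'de'
def tieneDeT : Nat → List Char → Bool
  | _, [] => false
  | 0, c :: r => tieneDeT (if c = 'd' then 1 else 0) r
  | 1, c :: r => tieneDeT (if c = 'e' then 2 else if c = 'd' then 1 else 0) r
  | _+2, c :: r => if c = 't' then true else tieneDeT 2 r

def cantida_de_palabra_alt (archivo_leido : String) : Int :=
  ((PySem.Str.split₀ archivo_leido).countP
      (fun w => tieneDeT 0 (PySem.Str.lower w).toList) : Int)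

-- ===== PRECONDITION & SPEC =====
def Spec_cantida_de_palabra (archivo_leido : String) (out : Int) : Prop := out = cantida_de_palabra_alt archivo_leido
instance (archivo_leido : String) (out : Int) : Decidable (Spec_cantida_de_palabra archivo_leido out) := by unfold Spec_cantida_de_palabra; infer_instance

-- ===== CLAIM (what is proved, stated in full; the proofs are below) =====
def Claim_equal_cantida_de_palabra : Prop := ∀ (archivo_leido : String), Dom_cantida_de_palabra archivo_leido → Spec_cantida_de_palabra archivo_leido (cantida_de_palabra archivo_leido)

-- ===== LEMMAS AND PROOFS =====

-- 'the word (as a char list) contains "de" with a "t" somewhere after it'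
def GoodDeT (l : List Char) : Prop := ∃ j, ['d', 'e'] <+: l.drop j ∧ 't' ∈ l.drop (j + 2)

-- what state 1 (a pending 'd') accepts
def GoodDeT1 (l : List Char) : Prop := (∃ r, l = 'e' :: r ∧ 't' ∈ r) ∨ GoodDeT l

theorem goodDeT_nil : ¬ GoodDeT [] := by
  rintro ⟨j, h, -⟩; simp at h

theorem goodDeT_cons_ne {c : Char} {r : List Char} (hc : c ≠ 'd') :
    GoodDeT (c :: r) ↔ GoodDeT r := by
  constructor
  · rintro ⟨j, hp, ht⟩
    cases j with
    | zero =>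
      simp only [List.drop_zero] at hp
      obtain ⟨t, ht'⟩ := hp
      injection ht' with h1 _
      exact absurd h1.symm hc
    | succ j => exact ⟨j, by simpa using hp, by simpa using ht⟩
  · rintro ⟨j, hp, ht⟩
    exact ⟨j + 1, by simpa using hp, by simpa using ht⟩

theorem goodDeT_cons_d {r : List Char} :
    GoodDeT ('d' :: r) ↔ GoodDeT1 r := by
  constructor
  · rintro ⟨j, hp, ht⟩
    cases j with
    | zero =>
      simp only [List.drop_zero] at hp
      obtain ⟨t, ht'⟩ := hp
      injection ht' with _ h2
      subst h2
      exact Or.inl ⟨t, rfl, by simpa using ht⟩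
    | succ j => exact Or.inr ⟨j, by simpa using hp, by simpa using ht⟩
  · rintro (⟨r', rfl, ht⟩ | ⟨j, hp, ht⟩)
    · exact ⟨0, ⟨r', rfl⟩, by simpa using ht⟩
    · exact ⟨j + 1, by simpa using hp, by simpa using ht⟩

theorem goodDeT1_cons_e {r : List Char} :
    GoodDeT1 ('e' :: r) ↔ 't' ∈ r := by
  constructor
  · rintro (⟨r', he, ht⟩ | ⟨j, hp, ht⟩)
    · cases he; exact ht
    · -- any occurrence of "de" in 'e'::r starts at j ≥ 0, so drop (j+2) is a suffix of r
      have hsub : ('e' :: r).drop (j + 2) = r.drop (j + 1) := by simp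
      rw [hsub] at ht
      exact List.drop_subset _ _ ht
  · intro ht; exact Or.inl ⟨r, rfl, ht⟩

theorem goodDeT1_cons_ne {c : Char} {r : List Char} (hc : c ≠ 'e') :
    GoodDeT1 (c :: r) ↔ GoodDeT (c :: r) := by
  unfold GoodDeT1
  constructor
  · rintro (⟨r', he, -⟩ | h)
    · injection he with h1 _
      exact absurd h1 hc
    · exact h
  · exact Or.inr

theorem tieneDeT_two (l : List Char) (s : Nat) :
    tieneDeT (s + 2) l = true ↔ 't' ∈ l := by
  induction l generalizing s with
  | nil => simp [tieneDeT]
  | cons c r ih =>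
    by_cases hc : c = 't'
    · subst hc; simp [tieneDeT]
    · simp [tieneDeT, hc, ih 0, Ne.symm hc]

theorem tieneDeT_spec (l : List Char) :
    (tieneDeT 0 l = true ↔ GoodDeT l) ∧ (tieneDeT 1 l = true ↔ GoodDeT1 l) := by
  induction l with
  | nil =>
    constructor
    · simp [tieneDeT]; exact goodDeT_nil
    · simp [tieneDeT, GoodDeT1]
      exact fun h => goodDeT_nil h
  | cons c r ih =>
    constructor
    · by_cases hc : c = 'd'
      · subst hc
        simpa [tieneDeT, goodDeT_cons_d] using ih.2
      · simpa [tieneDeT, hc, goodDeT_cons_ne hc] using ih.1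
    · by_cases hc : c = 'e'
      · subst hc
        simpa [tieneDeT, goodDeT1_cons_e] using tieneDeT_two r 0
      · by_cases hd : c = 'd'
        · subst hd
          rw [goodDeT1_cons_ne hc, goodDeT_cons_d]
          simpa [tieneDeT] using ih.2
        · rw [goodDeT1_cons_ne hc, goodDeT_cons_ne hd]
          simpa [tieneDeT, hc, hd] using ih.1

theorem aword_iff (l : List Char) :
    (PySem.Chars.isIn ['d', 'e'] l &&
      PySem.Chars.isIn ['t'] (PySem.List.slice l (some (PySem.Chars.find l ['d', 'e'] + 2)) none)) = true
    ↔ GoodDeT l := by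
  constructor
  · intro h
    rw [Bool.and_eq_true] at h
    obtain ⟨h1, h2⟩ := h
    have hinf := (PySem.Chars.isIn_iff_infix _ _).mp h1
    have hnn : 0 ≤ PySem.Chars.find l ['d', 'e'] := (PySem.Chars.find_nonneg_iff _ _).mpr hinf
    have hspec := PySem.Chars.find_spec (s := l) (sub := ['d', 'e']) hnn
    rw [PySem.List.slice_from l (a := PySem.Chars.find l ['d', 'e'] + 2) (by omega)] at h2
    have h2' : 't' ∈ l.drop (PySem.Chars.find l ['d', 'e'] + 2).toNat :=
      ((PySem.Chars.isIn_iff_infix _ _).mp h2).subset (by simp)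
    refine ⟨(PySem.Chars.find l ['d', 'e']).toNat, hspec.1, ?_⟩
    have : (PySem.Chars.find l ['d', 'e'] + 2).toNat = (PySem.Chars.find l ['d', 'e']).toNat + 2 := by omega
    rwa [this] at h2'
  · rintro ⟨j, hp, ht⟩
    have hinf : ['d', 'e'] <:+: l := hp.isInfix.trans (l.drop_suffix j).isInfix
    have h1 : PySem.Chars.isIn ['d', 'e'] l = true := (PySem.Chars.isIn_iff_infix _ _).mpr hinf
    have hnn : 0 ≤ PySem.Chars.find l ['d', 'e'] := (PySem.Chars.find_nonneg_iff _ _).mpr hinf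
    have hspec := PySem.Chars.find_spec (s := l) (sub := ['d', 'e']) hnn
    have hle : (PySem.Chars.find l ['d', 'e']).toNat ≤ j := by
      by_contra hlt
      exact hspec.2 j (by omega) hp
    rw [Bool.and_eq_true]
    refine ⟨h1, ?_⟩
    rw [PySem.List.slice_from l (a := PySem.Chars.find l ['d', 'e'] + 2) (by omega)]
    apply (PySem.Chars.isIn_iff_infix _ _).mpr
    have : (PySem.Chars.find l ['d', 'e'] + 2).toNat = (PySem.Chars.find l ['d', 'e']).toNat + 2 := by omega
    rw [this]
    have htm : 't' ∈ l.drop ((PySem.Chars.find l ['d', 'e']).toNat + 2) := by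
      have hdd : l.drop (j + 2) = (l.drop ((PySem.Chars.find l ['d', 'e']).toNat + 2)).drop
          ((j + 2) - ((PySem.Chars.find l ['d', 'e']).toNat + 2)) := by
        rw [List.drop_drop]; congr 1; omega
      rw [hdd] at ht
      exact List.drop_subset _ _ ht
    obtain ⟨pre, suf, hps⟩ := List.append_of_mem htm
    exact ⟨pre, suf, by rw [hps]; simp⟩

-- the two per-word tests agree
theorem pred_eq (w : String) :
    (PySem.Str.isIn "de" (PySem.Str.lower w) &&
      PySem.Str.isIn "t" (PySem.Str.slice (PySem.Str.lower w)
        (some (PySem.Str.find (PySem.Str.lower w) "de" + 2)) none))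
    = tieneDeT 0 (PySem.Str.lower w).toList := by
  have hA := aword_iff (PySem.Str.lower w).toList
  have hB := (tieneDeT_spec (PySem.Str.lower w).toList).1
  have : (PySem.Str.isIn "de" (PySem.Str.lower w) &&
      PySem.Str.isIn "t" (PySem.Str.slice (PySem.Str.lower w)
        (some (PySem.Str.find (PySem.Str.lower w) "de" + 2)) none)) = true
      ↔ tieneDeT 0 (PySem.Str.lower w).toList = true := by
    rw [hB, ← hA]
    simp [PySem.Str.isIn, PySem.Str.find, PySem.Str.slice]
  cases hb : tieneDeT 0 (PySem.Str.lower w).toList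
  · rw [hb] at this; simpa using (not_iff_not.mpr this).mpr (by simp)
  · rw [hb] at this; exact this.mpr rfl

-- ===== VERDICT (by name: the statement is the Claim_ definition above) =====
theorem cantida_de_palabra_spec : Claim_equal_cantida_de_palabra := by
  intro s _
  unfold Spec_cantida_de_palabra cantida_de_palabra cantida_de_palabra_alt
  simp only []
  rw [show (0 : Int) = 0 + 0 from rfl]
  rw [PySem.List.foldl_if_add_one]
  simp only [zero_add, Int.natCast_inj]
  congr 1
  funext w
  exact pred_eq w
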